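-- pv_equiv track=rewrite | github.com/Appbird/muse-leader | src/utility/abc_diff.py | compare_blocks
-- ===== SOURCE A (Python) =====
-- from typing import List, Dict, Tuple
-- from typing import List, Dict, Tuple
--
-- def measure_equal(ma: Dict, mb: Dict) -> bool:
-- 	return ma == mb
--
-- def compare_blocks(
-- 	measures_a: List[Dict],
-- 	measures_b: List[Dict],
-- 	block_size: int = 4
-- ) -> List[Tuple[int,int,int]] | None:
-- 	"""
-- 	measures_a, measures_b を block_size 小節ずつ区切って比較し、
-- 	差分のあるブロックを (ブロック番号, 開始小節, 終了小節) のリストで返す。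
--
-- 	例: [(1,1,4), (3,9,12)] など
-- 	"""
-- 	n = len(measures_a)
-- 	if len(measures_b) != n:	return None
-- 	if n % block_size != 0:		return None
--
-- 	diffs: List[Tuple[int,int,int]] = []
-- 	for i in range(n // block_size):
-- 		start = i * block_size
-- 		end = start + block_size
-- 		block_a = measures_a[start:end]
-- 		block_b = measures_b[start:end]
-- 		# いずれかの小節で等しくなければ差分あり
-- 		if any(not measure_equal(a, b) for a, b in zip(block_a, block_b)):
-- 			diffs.append((i, start+1, end))
-- 	return diffs
-- ===== SOURCE B (Python) =====
-- def measure_equal(ma, mb):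
-- 	return ma == mb
--
-- def compare_blocks(measures_a, measures_b, block_size=4):
-- 	n = len(measures_a)
-- 	if len(measures_b) != n:	return None
-- 	if n % block_size != 0:		return None
--
-- 	# one pass over the measures, bucketing differing indices into blocks
-- 	diff_blocks = set()
-- 	for i, (a, b) in enumerate(zip(measures_a, measures_b)):
-- 		if not measure_equal(a, b):
-- 			diff_blocks.add(i // block_size)
--
-- 	result = []
-- 	for blk in range(n // block_size):
-- 		if blk in diff_blocks:
-- 			start = blk * block_size
-- 			result.append((blk, start + 1, start + block_size))
-- 	return result
-- ===== Notes on version B (the rewrite author's own statement) =====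
-- stated objective: alternative
-- what changed: Replaces A's nested scan (slice out each block, then scan the block's zipped measures) by a single pass over the zipped measure lists that buckets each differing index i into block i // block_size in a set, followed by one membership scan over the block range.
import Mathlib
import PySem

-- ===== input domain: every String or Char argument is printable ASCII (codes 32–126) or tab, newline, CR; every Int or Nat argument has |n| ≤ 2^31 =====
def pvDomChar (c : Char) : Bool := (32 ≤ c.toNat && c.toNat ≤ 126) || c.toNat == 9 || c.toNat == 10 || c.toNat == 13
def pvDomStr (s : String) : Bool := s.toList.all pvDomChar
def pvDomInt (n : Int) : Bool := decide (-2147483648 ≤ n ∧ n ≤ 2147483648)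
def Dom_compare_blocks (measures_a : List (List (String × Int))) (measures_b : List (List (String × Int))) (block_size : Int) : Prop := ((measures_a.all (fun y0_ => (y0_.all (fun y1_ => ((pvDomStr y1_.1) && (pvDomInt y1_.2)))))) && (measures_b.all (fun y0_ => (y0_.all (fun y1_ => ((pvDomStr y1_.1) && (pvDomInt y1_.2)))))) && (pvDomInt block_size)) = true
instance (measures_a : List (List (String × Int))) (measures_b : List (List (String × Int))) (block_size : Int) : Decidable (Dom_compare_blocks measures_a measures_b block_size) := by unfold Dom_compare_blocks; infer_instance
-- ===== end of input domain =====

-- B replaces A's nested block scan (slice each block, scan it) by ONE pass over the zipped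
-- measure lists that buckets each differing index i into block i // block_size (a set),
-- followed by a membership scan over the block range; objective: alternative decomposition.

-- shared helper: Python's 'ma == mb' on two dicts (order-insensitive, duplicate keys collapse
-- last-wins via dict construction); exact port of measure_equal for dicts given as assoc lists.
def measureEqual (ma mb : List (String × Int)) : Bool :=
  let da := PySem.Dict.ofList ma
  let db := PySem.Dict.ofList mb
  da.keys.length == db.keys.length && da.keys.all (fun k => da.get? k == db.get? k)

-- ===== PORT A =====
def compare_blocks (measures_a : List (List (String × Int))) (measures_b : List (List (String × Int))) (block_size : Int) : Option (List (Int × Int × Int)) :=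
  let n : Int := PySem.List.len measures_a
  if PySem.List.len measures_b ≠ n then none
  else if PySem.Int.mod n block_size ≠ 0 then none
  else some ((PySem.List.pyRange 0 (PySem.Int.floordiv n block_size) 1).foldl
    (fun diffs i =>
      let start := i * block_size
      let stop := start + block_size
      let block_a := PySem.List.slice measures_a (some start) (some stop)
      let block_b := PySem.List.slice measures_b (some start) (some stop)
      if (block_a.zip block_b).any (fun p => !(measureEqual p.1 p.2))
      then diffs ++ [(i, start + 1, stop)] else diffs) [])

-- ===== PORT B =====
-- B-side helper: the set of block numbers containing a differing measure (one pass, bucketing)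
def diffBlockSet (measures_a measures_b : List (List (String × Int))) (block_size : Int) : PySem.Set Int :=
  (PySem.List.enumerate (measures_a.zip measures_b) 0).foldl
    (fun s p => if !(measureEqual p.2.1 p.2.2)
                then PySem.Set.add s (PySem.Int.floordiv p.1 block_size) else s)
    PySem.Set.empty

def compare_blocks_alt (measures_a : List (List (String × Int))) (measures_b : List (List (String × Int))) (block_size : Int) : Option (List (Int × Int × Int)) :=
  let n : Int := PySem.List.len measures_a
  if PySem.List.len measures_b ≠ n then none
  else if PySem.Int.mod n block_size ≠ 0 then none
  else
    let db := diffBlockSet measures_a measures_b block_size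
    some ((PySem.List.pyRange 0 (PySem.Int.floordiv n block_size) 1).foldl
      (fun res blk =>
        if PySem.Set.contains db blk
        then res ++ [(blk, blk * block_size + 1, blk * block_size + block_size)] else res) [])

-- ===== PRECONDITION & SPEC =====
-- Pre_ excludes only block_size = 0 with equal-length inputs: there A raises ZeroDivisionError
-- at 'n % block_size' (and B raises it too).
def Pre_compare_blocks (measures_a : List (List (String × Int))) (measures_b : List (List (String × Int))) (block_size : Int) : Prop :=
  measures_a.length = measures_b.length → block_size ≠ 0
instance (measures_a : List (List (String × Int))) (measures_b : List (List (String × Int))) (block_size : Int) : Decidable (Pre_compare_blocks measures_a measures_b block_size) := by unfold Pre_compare_blocks; infer_instance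

def pvWitness_compare_blocks : (List (List (String × Int))) × (List (List (String × Int))) × Int :=
  ([[("a", 1)]], [[("a", 2)]], 1)

def Spec_compare_blocks (measures_a : List (List (String × Int))) (measures_b : List (List (String × Int))) (block_size : Int) (out : Option (List (Int × Int × Int))) : Prop := out = compare_blocks_alt measures_a measures_b block_size
instance (measures_a : List (List (String × Int))) (measures_b : List (List (String × Int))) (block_size : Int) (out : Option (List (Int × Int × Int))) : Decidable (Spec_compare_blocks measures_a measures_b block_size out) := by unfold Spec_compare_blocks; infer_instance

-- ===== CLAIM (what is proved, stated in full; the proofs are below) =====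
def Claim_equal_compare_blocks : Prop := ∀ (measures_a : List (List (String × Int))) (measures_b : List (List (String × Int))) (block_size : Int), Dom_compare_blocks measures_a measures_b block_size → Pre_compare_blocks measures_a measures_b block_size → Spec_compare_blocks measures_a measures_b block_size (compare_blocks measures_a measures_b block_size)

-- ===== LEMMAS AND PROOFS =====

-- membership in B's bucketing fold
lemma mem_bucket_foldl (bs : Int) :
    ∀ (l : List (Int × (List (String × Int) × List (String × Int)))) (s0 : PySem.Set Int) (x : Int),
      (x ∈ l.foldl (fun s p => if !(measureEqual p.2.1 p.2.2)
                               then PySem.Set.add s (PySem.Int.floordiv p.1 bs) else s) s0)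
      ↔ x ∈ s0 ∨ ∃ p ∈ l, (!(measureEqual p.2.1 p.2.2)) = true ∧ PySem.Int.floordiv p.1 bs = x := by
  intro l
  induction l with
  | nil => simp
  | cons hd tl ih =>
    intro s0 x
    simp only [List.foldl_cons]
    by_cases h : (!(measureEqual hd.2.1 hd.2.2)) = true
    · rw [if_pos h, ih, PySem.Set.mem_add]
      simp only [List.mem_cons]
      constructor
      · rintro ((hs | rfl) | ⟨p, hp, hc, hf⟩)
        · exact Or.inl hs
        · exact Or.inr ⟨hd, Or.inl rfl, h, rfl⟩
        · exact Or.inr ⟨p, Or.inr hp, hc, hf⟩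
      · rintro (hs | ⟨p, (rfl | hp), hc, hf⟩)
        · exact Or.inl (Or.inl hs)
        · exact Or.inl (Or.inr hf.symm)
        · exact Or.inr ⟨p, hp, hc, hf⟩
    · rw [if_neg h, ih]
      simp only [List.mem_cons]
      constructor
      · rintro (hs | ⟨p, hp, hc, hf⟩)
        · exact Or.inl hs
        · exact Or.inr ⟨p, Or.inr hp, hc, hf⟩
      · rintro (hs | ⟨p, (rfl | hp), hc, hf⟩)
        · exact Or.inl hs
        · exact absurd hc h
        · exact Or.inr ⟨p, hp, hc, hf⟩

lemma mem_diffBlockSet (ma mb : List (List (String × Int))) (bs x : Int) :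
    x ∈ diffBlockSet ma mb bs ↔
      ∃ k : Nat, ∃ h : k < (ma.zip mb).length,
        (!(measureEqual (ma.zip mb)[k].1 (ma.zip mb)[k].2)) = true ∧ PySem.Int.floordiv (k : Int) bs = x := by
  unfold diffBlockSet
  rw [mem_bucket_foldl]
  simp only [PySem.Set.empty, List.not_mem_nil, false_or]
  constructor
  · rintro ⟨p, hp, hc, hf⟩
    rw [PySem.List.mem_enumerate_iff] at hp
    obtain ⟨k, hk, rfl⟩ := hp
    exact ⟨k, hk, hc, by simpa using hf⟩
  · rintro ⟨k, hk, hc, hf⟩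
    refine ⟨((k : Int), (ma.zip mb)[k]), ?_, hc, by simpa using hf⟩
    rw [PySem.List.mem_enumerate_iff]
    exact ⟨k, hk, by simp⟩

-- A's per-block test equals B's set membership test, inside the block range
lemma block_cond_eq (ma mb : List (List (String × Int))) (bs blk : Int)
    (hlen : mb.length = ma.length) (hbs : 0 < bs)
    (hblk : 0 ≤ blk) (hub : (blk + 1) * bs ≤ (ma.length : Int)) :
    ((PySem.List.slice ma (some (blk * bs)) (some (blk * bs + bs))).zip
       (PySem.List.slice mb (some (blk * bs)) (some (blk * bs + bs)))).any
        (fun p => !(measureEqual p.1 p.2))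
      = PySem.Set.contains (diffBlockSet ma mb bs) blk := by
  have hm : (blk + 1) * bs = blk * bs + bs := by ring
  have ha : (0:Int) ≤ blk * bs := mul_nonneg hblk hbs.le
  obtain ⟨A, hA⟩ : ∃ A : Nat, (A : Int) = blk * bs := ⟨(blk * bs).toNat, Int.toNat_of_nonneg ha⟩
  obtain ⟨B, hB⟩ : ∃ B : Nat, (B : Int) = bs := ⟨bs.toNat, Int.toNat_of_nonneg hbs.le⟩
  have hub' : (A : Int) + (B : Int) ≤ (ma.length : Int) := by
    rw [hA, hB]; linarith [hm, hub]
  rw [Bool.eq_iff_iff, PySem.Set.contains_iff, mem_diffBlockSet]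
  rw [show blk * bs + bs = (A : Int) + (B : Int) by rw [hA, hB], ← hA]
  rw [PySem.List.slice_natCast_add, PySem.List.slice_natCast_add]
  constructor
  · intro h
    obtain ⟨p, hp, hcond⟩ := List.any_eq_true.mp h
    obtain ⟨j, hj, rfl⟩ := List.mem_iff_getElem.mp hp
    have hjB : j < B := by
      simp only [List.length_zip, List.length_take, List.length_drop, hlen] at hj
      omega
    refine ⟨A + j, by simp only [List.length_zip, hlen, min_self]; omega, ?_, ?_⟩
    · simp only [List.getElem_zip, List.getElem_take, List.getElem_drop] at hcond ⊢
      exact hcond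
    · rw [PySem.Int.floordiv_eq_iff_of_pos hbs, hm, ← hA, ← hB]
      push_cast
      omega
  · rintro ⟨k, hk, hcond, hdiv⟩
    rw [PySem.Int.floordiv_eq_iff_of_pos hbs, hm, ← hA, ← hB] at hdiv
    simp only [List.length_zip, hlen, min_self] at hk
    have hbounds : A ≤ k ∧ k < A + B := by omega
    rw [List.any_eq_true]
    have hjlen : k - A < (((ma.drop A).take B).zip ((mb.drop A).take B)).length := by
      simp only [List.length_zip, List.length_take, List.length_drop, hlen]
      omega
    refine ⟨_, List.getElem_mem hjlen, ?_⟩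
    simp only [List.getElem_zip, List.getElem_take, List.getElem_drop,
      Nat.add_sub_cancel' hbounds.1] at hcond ⊢
    exact hcond

-- ===== VERDICT (by name: the statement is the Claim_ definition above) =====
theorem compare_blocks_spec : Claim_equal_compare_blocks := by
  intro ma mb bs _ hpre
  unfold Spec_compare_blocks compare_blocks compare_blocks_alt
  simp only [PySem.List.len_eq]
  by_cases h1 : (mb.length : Int) = (ma.length : Int)
  · have hg1 : ¬((mb.length : Int) ≠ (ma.length : Int)) := by omega
    rw [if_neg hg1, if_neg hg1]
    have hbs : bs ≠ 0 := hpre (by exact_mod_cast h1.symm)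
    by_cases h2 : PySem.Int.mod ((ma.length : Int)) bs = 0
    · have hg2 : ¬(PySem.Int.mod ((ma.length : Int)) bs ≠ 0) := by simp [h2]
      rw [if_neg hg2, if_neg hg2]
      congr 1
      apply PySem.List.foldl_congr_mem
      intro acc blk hblk
      rw [PySem.List.mem_pyRange_one] at hblk
      -- the range is nonempty at blk, so 0 < floordiv n bs with n ≥ 0, forcing 0 < bs
      have hqpos : 0 < PySem.Int.floordiv (ma.length : Int) bs := lt_of_le_of_lt hblk.1 hblk.2
      have hfd := PySem.Int.floordiv_mul_add_mod (ma.length : Int) bs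
      rw [h2, add_zero] at hfd
      have hbspos : 0 < bs := by
        by_contra hneg
        have hlt : bs < 0 := by omega
        nlinarith [Int.natCast_nonneg ma.length]
      have hub : (blk + 1) * bs ≤ (ma.length : Int) := by nlinarith [hblk.2]
      have hc := block_cond_eq ma mb bs blk (by exact_mod_cast h1) hbspos hblk.1 hub
      simp only [hc]
    · rw [if_pos h2, if_pos h2]
  · have hg1 : (mb.length : Int) ≠ (ma.length : Int) := h1
    rw [if_pos hg1, if_pos hg1]
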